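-- pv_equiv track=rewrite | github.com/ss-di/2023-1580-EGE2024 | 1580-2023-Т-319/2023_10_19 - ЕГЭ22/p23.py | calc
-- ===== SOURCE A (Python) =====
-- def calc(f, t, p):
--     if f == t and len(p) > 0:
--         return 1
--     if f in p:
--         return 0
--
--     return calc((f+1)%10, t, p + [f]) + \
--            calc((f+3)%10, t, p + [f]) + \
--            calc((f+7)%10, t, p + [f])
-- ===== SOURCE B (Python) =====
-- def calc(f, t, p):
--     if f == t and len(p) > 0:
--         return 1
--     if f in p:
--         return 0
--     vis = {x for x in p if 0 <= x <= 9}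
--     if 0 <= f <= 9:
--         vis.add(f)
--     mask0 = sum(2 ** x for x in vis)
--     # rows[i] is the DP row for visited-mask (current mask + 1 + i); a row lists,
--     # for each digit v, the number of simple paths from v to t avoiding the mask.
--     rows = []
--     for mask in range(1023, -1, -1):
--         row = []
--         for v in range(10):
--             if v == t:
--                 row.append(1)
--             elif mask // 2 ** v % 2:
--                 row.append(0)
--             else:
--                 r2 = rows[2 ** v - 1]  # the row for mask + 2 ** v
--                 row.append(r2[(v + 1) % 10] + r2[(v + 3) % 10] + r2[(v + 7) % 10])
--         rows.insert(0, row)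
--     return rows[mask0][(f + 1) % 10] + rows[mask0][(f + 3) % 10] + rows[mask0][(f + 7) % 10]
-- ===== Notes on version B (the rewrite author's own statement) =====
-- stated objective: faster
-- what changed: A enumerates every simple path recursively (exponential); B precomputes one bottom-up DP table indexed by (digit, visited-digit bitmask) over all 10*1024 states and answers with three table lookups.
import Mathlib
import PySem

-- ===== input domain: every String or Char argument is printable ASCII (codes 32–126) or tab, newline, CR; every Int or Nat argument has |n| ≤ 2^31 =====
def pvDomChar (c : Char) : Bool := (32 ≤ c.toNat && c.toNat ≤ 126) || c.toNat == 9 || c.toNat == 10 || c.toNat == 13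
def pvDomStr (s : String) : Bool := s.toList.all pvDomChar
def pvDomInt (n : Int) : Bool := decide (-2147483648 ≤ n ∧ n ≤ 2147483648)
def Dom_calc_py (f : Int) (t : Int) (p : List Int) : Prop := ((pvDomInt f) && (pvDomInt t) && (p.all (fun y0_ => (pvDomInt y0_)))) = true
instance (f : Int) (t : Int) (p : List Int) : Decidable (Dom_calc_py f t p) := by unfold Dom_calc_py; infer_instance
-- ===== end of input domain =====

-- B replaces A's exponential enumeration of simple paths by a bottom-up DP table over
-- (node, visited-digit-set) states; objective: faster (asymptotic).

-- helper used by port A's termination measure: number of distinct digits 0..9 occurring in p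
def pvDigCard (p : List Int) : Nat := ((Finset.range 10).filter (fun d : ℕ => (d : Int) ∈ p)).card

-- ===== PORT A =====
def calc_py (f : Int) (t : Int) (p : List Int) : Int :=
  if f = t ∧ p.length > 0 then 1
  else if _h2 : f ∈ p then 0
  else calc_py (PySem.Int.mod (f + 1) 10) t (p ++ [f])
     + calc_py (PySem.Int.mod (f + 3) 10) t (p ++ [f])
     + calc_py (PySem.Int.mod (f + 7) 10) t (p ++ [f])
termination_by 2 * (10 - pvDigCard p) + (if 0 ≤ f ∧ f < 10 then 0 else 1)
decreasing_by
  all_goals {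
    have hmodlo : (0:Int) ≤ PySem.Int.mod (f + 1) 10 ∧ PySem.Int.mod (f + 1) 10 < 10 := by
      rw [PySem.Int.mod_eq_emod_of_pos (by norm_num)]
      exact ⟨Int.emod_nonneg _ (by norm_num), Int.emod_lt_of_pos _ (by norm_num)⟩
    have hmodlo3 : (0:Int) ≤ PySem.Int.mod (f + 3) 10 ∧ PySem.Int.mod (f + 3) 10 < 10 := by
      rw [PySem.Int.mod_eq_emod_of_pos (by norm_num)]
      exact ⟨Int.emod_nonneg _ (by norm_num), Int.emod_lt_of_pos _ (by norm_num)⟩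
    have hmodlo7 : (0:Int) ≤ PySem.Int.mod (f + 7) 10 ∧ PySem.Int.mod (f + 7) 10 < 10 := by
      rw [PySem.Int.mod_eq_emod_of_pos (by norm_num)]
      exact ⟨Int.emod_nonneg _ (by norm_num), Int.emod_lt_of_pos _ (by norm_num)⟩
    have hle10 : pvDigCard (p ++ [f]) ≤ 10 := by
      have := Finset.card_filter_le (Finset.range 10) (fun d : ℕ => (d : Int) ∈ p ++ [f])
      simpa [pvDigCard] using this
    by_cases hf : 0 ≤ f ∧ f < 10
    · -- f is a digit not in p: the digit set strictly grows
      have hmem : f.toNat ∈ (Finset.range 10).filter (fun d : ℕ => (d : Int) ∈ p ++ [f]) := by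
        simp only [Finset.mem_filter, Finset.mem_range]
        constructor
        · omega
        · have : (f.toNat : Int) = f := Int.toNat_of_nonneg hf.1
          rw [this]; simp
      have hnot : f.toNat ∉ (Finset.range 10).filter (fun d : ℕ => (d : Int) ∈ p) := by
        simp only [Finset.mem_filter, Finset.mem_range]
        intro hc
        have : (f.toNat : Int) = f := Int.toNat_of_nonneg hf.1
        rw [this] at hc
        exact _h2 hc.2
      have hlt : pvDigCard p < pvDigCard (p ++ [f]) := by
        apply Finset.card_lt_card
        constructor
        · intro d hd
          simp only [Finset.mem_filter] at *
          exact ⟨hd.1, List.mem_append_left _ hd.2⟩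
        · intro hcon
          exact hnot (hcon hmem)
      rw [if_pos hf]
      first | rw [if_pos hmodlo] | rw [if_pos hmodlo3] | rw [if_pos hmodlo7]
      omega
    · -- f is not a digit: the digit set is unchanged, the flag drops from 1 to 0
      have heq : pvDigCard (p ++ [f]) = pvDigCard p := by
        unfold pvDigCard
        congr 1
        apply Finset.filter_congr
        intro d hd
        simp only [Finset.mem_range] at hd
        simp only [List.mem_append, List.mem_singleton]
        constructor
        · rintro (h | h)
          · exact h
          · exfalso; apply hf; constructor <;> omega
        · intro h; exact Or.inl h
      rw [if_neg hf, heq]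
      first | rw [if_pos hmodlo] | rw [if_pos hmodlo3] | rw [if_pos hmodlo7]
      omega
  }

-- ===== PORT B =====
-- one DP row (the inner loop of Source B): for each digit v, the path count from v to t
-- avoiding the digits of mask; rows[2^v - 1] is the already-computed row of mask + 2^v
def pvAltRow (t : Int) (rows : List (List Int)) (mask : Int) : List Int :=
  (PySem.List.pyRange 0 10 1).foldl (fun row v =>
    row ++ [if v = t then 1
      else if PySem.Int.mod (PySem.Int.floordiv mask (2 ^ v.toNat)) 2 ≠ 0 then 0
      else
        PySem.List.pyGetD (PySem.List.pyGetD rows ((2 : Int) ^ v.toNat - 1) [])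
          (PySem.Int.mod (v + 1) 10) 0
      + PySem.List.pyGetD (PySem.List.pyGetD rows ((2 : Int) ^ v.toNat - 1) [])
          (PySem.Int.mod (v + 3) 10) 0
      + PySem.List.pyGetD (PySem.List.pyGetD rows ((2 : Int) ^ v.toNat - 1) [])
          (PySem.Int.mod (v + 7) 10) 0]) []

-- outer loop: for mask in range(1023, -1, -1); rows.insert(0, row) prepends (exact)
def pvAltRows (t : Int) : List (List Int) :=
  (PySem.List.pyRange 1023 (-1) (-1)).foldl (fun rows mask => pvAltRow t rows mask :: rows) []

def calc_py_alt (f : Int) (t : Int) (p : List Int) : Int :=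
  if f = t ∧ p.length > 0 then 1
  else if f ∈ p then 0
  else
    let vis : PySem.Set Int := PySem.Set.ofList (p.filter (fun x => decide (0 ≤ x ∧ x ≤ 9)))
    let vis : PySem.Set Int := if 0 ≤ f ∧ f ≤ 9 then PySem.Set.add vis f else vis
    let mask0 : Int := vis.foldl (fun s x => s + 2 ^ x.toNat) 0
    let rows := pvAltRows t
    PySem.List.pyGetD (PySem.List.pyGetD rows mask0 []) (PySem.Int.mod (f + 1) 10) 0
  + PySem.List.pyGetD (PySem.List.pyGetD rows mask0 []) (PySem.Int.mod (f + 3) 10) 0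
  + PySem.List.pyGetD (PySem.List.pyGetD rows mask0 []) (PySem.Int.mod (f + 7) 10) 0

-- ===== PRECONDITION & SPEC =====
def Spec_calc_py (f : Int) (t : Int) (p : List Int) (out : Int) : Prop := out = calc_py_alt f t p
instance (f : Int) (t : Int) (p : List Int) (out : Int) : Decidable (Spec_calc_py f t p out) := by unfold Spec_calc_py; infer_instance

-- ===== CLAIM (what is proved, stated in full; the proofs are below) =====
def Claim_equal_calc_py : Prop := ∀ (f : Int) (t : Int) (p : List Int), Dom_calc_py f t p → Spec_calc_py f t p (calc_py f t p)

-- ===== LEMMAS AND PROOFS =====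

-- reference function: number of simple digit paths from v to t avoiding the digit set s
def pvR (t : Int) (v : Fin 10) (s : Finset (Fin 10)) : Int :=
  if ((v : ℕ) : ℤ) = t then 1
  else if _h : v ∈ s then 0
  else pvR t (v + 1) (insert v s) + pvR t (v + 3) (insert v s) + pvR t (v + 7) (insert v s)
termination_by (Finset.univ \ s).card
decreasing_by
  all_goals {
    apply Finset.card_lt_card
    constructor
    · intro d hd
      simp only [Finset.mem_sdiff, Finset.mem_insert] at *
      exact ⟨hd.1, fun hc => hd.2 (by tauto)⟩
    · intro hc
      have hv : v ∈ Finset.univ \ s := by simp [_h]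
      have := hc hv
      simp at this
  }

lemma pvR_eq_one {t : Int} {v : Fin 10} {s : Finset (Fin 10)} (h : ((v : ℕ) : ℤ) = t) :
    pvR t v s = 1 := by rw [pvR]; simp [h]

lemma pvR_eq_zero {t : Int} {v : Fin 10} {s : Finset (Fin 10)} (h1 : ((v : ℕ) : ℤ) ≠ t)
    (h2 : v ∈ s) : pvR t v s = 0 := by rw [pvR]; simp [h1, h2]

lemma pvR_eq_rec {t : Int} {v : Fin 10} {s : Finset (Fin 10)} (h1 : ((v : ℕ) : ℤ) ≠ t)
    (h2 : v ∉ s) :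
    pvR t v s = pvR t (v + 1) (insert v s) + pvR t (v + 3) (insert v s) + pvR t (v + 7) (insert v s) := by
  rw [pvR]; simp [h1, h2]

-- the set of digits occurring in a list
def pvDigs (p : List Int) : Finset (Fin 10) := Finset.univ.filter (fun d => ((d : ℕ) : ℤ) ∈ p)

-- the set of digits whose bit is set in a (nonnegative) mask
def pvMaskSet (m : Int) : Finset (Fin 10) := Finset.univ.filter (fun d => Nat.testBit m.toNat (d : ℕ))

lemma pv_modv1 (v : Fin 10) : PySem.Int.mod (((v : ℕ) : ℤ) + 1) 10 = (((v + 1 : Fin 10) : ℕ) : ℤ) := by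
  fin_cases v <;> decide

lemma pv_modv3 (v : Fin 10) : PySem.Int.mod (((v : ℕ) : ℤ) + 3) 10 = (((v + 3 : Fin 10) : ℕ) : ℤ) := by
  fin_cases v <;> decide

lemma pv_modv7 (v : Fin 10) : PySem.Int.mod (((v : ℕ) : ℤ) + 7) 10 = (((v + 7 : Fin 10) : ℕ) : ℤ) := by
  fin_cases v <;> decide

lemma pv_mod_bounds (a : Int) : 0 ≤ PySem.Int.mod a 10 ∧ PySem.Int.mod a 10 < 10 := by
  rw [PySem.Int.mod_eq_emod_of_pos (by norm_num)]
  exact ⟨Int.emod_nonneg _ (by norm_num), Int.emod_lt_of_pos _ (by norm_num)⟩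

-- the digit a nonnegative mod-10 value denotes
def pvToDig (a : Int) : Fin 10 := ⟨(PySem.Int.mod a 10).toNat, by
  have := pv_mod_bounds a; omega⟩

lemma pvToDig_coe (a : Int) : ((pvToDig a : ℕ) : ℤ) = PySem.Int.mod a 10 := by
  have := pv_mod_bounds a
  simp only [pvToDig]
  omega

lemma pvDigs_append_digit (p : List Int) (v : Fin 10) :
    pvDigs (p ++ [((v : ℕ) : ℤ)]) = insert v (pvDigs p) := by
  ext d
  simp only [pvDigs, Finset.mem_filter, Finset.mem_univ, true_and, Finset.mem_insert,
    List.mem_append, List.mem_singleton]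
  constructor
  · rintro (h | h)
    · exact Or.inr h
    · left; exact Fin.ext (by exact_mod_cast h)
  · rintro (h | h)
    · subst h; right; rfl
    · left; exact h

lemma pv_mem_digs {p : List Int} {d : Fin 10} : d ∈ pvDigs p ↔ ((d : ℕ) : ℤ) ∈ p := by
  simp [pvDigs]

-- the bit-arithmetic core: adding an unset bit
lemma pv_maskInsert {m v : ℕ} (hv : v < 10) (hm : m < 1024) (hbit : Nat.testBit m v = false) :
    m + 2 ^ v < 1024 ∧ ∀ d : ℕ, Nat.testBit (m + 2 ^ v) d = (Nat.testBit m d || decide (d = v)) := by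
  have hp : (2 : ℕ) ^ (v + 1) = 2 * 2 ^ v := by ring
  set a := m / 2 ^ (v + 1) with ha
  set b := m % 2 ^ (v + 1) with hb
  have hm' : 2 ^ (v + 1) * a + b = m := Nat.div_add_mod m (2 ^ (v + 1))
  have hblt' : b < 2 ^ (v + 1) := Nat.mod_lt _ (Nat.two_pow_pos _)
  have hbv : Nat.testBit b v = false := by
    rw [hb, Nat.testBit_mod_two_pow]
    simp [hbit]
  have hblt : b < 2 ^ v := by
    apply Nat.lt_pow_two_of_testBit
    intro i hi
    rcases Nat.eq_or_lt_of_le hi with h | h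
    · rw [← h]; exact hbv
    · exact Nat.testBit_lt_two_pow (lt_of_lt_of_le hblt' (Nat.pow_le_pow_right (by norm_num) h))
  have hsum : m + 2 ^ v = 2 ^ (v + 1) * a + (b + 2 ^ v) := by omega
  have hb2 : b + 2 ^ v < 2 ^ (v + 1) := by omega
  have hbits : ∀ d : ℕ, Nat.testBit (m + 2 ^ v) d = (Nat.testBit m d || decide (d = v)) := by
    intro d
    rw [hsum, Nat.testBit_two_pow_mul_add a hb2 d, ← hm',
      Nat.testBit_two_pow_mul_add a hblt' d]
    by_cases hd : d < v + 1
    · simp only [hd, if_pos]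
      rcases Nat.lt_or_ge d v with hdv | hdv
      · rw [Nat.add_comm b (2 ^ v), Nat.testBit_two_pow_add_gt hdv]
        simp [Nat.ne_of_lt hdv]
      · have hdveq : d = v := by omega
        subst hdveq
        rw [Nat.add_comm b (2 ^ d), Nat.testBit_two_pow_add_eq, hbv]
        simp
    · simp only [hd, if_false]
      have : d ≠ v := by omega
      simp [this]
  refine ⟨?_, hbits⟩
  apply Nat.lt_pow_two_of_testBit (n := 10)
  intro i hi
  rw [hbits i]
  have h1 : Nat.testBit m i = false := Nat.testBit_lt_two_pow (by
    calc m < 1024 := hm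
    _ = 2 ^ 10 := by norm_num
    _ ≤ 2 ^ i := Nat.pow_le_pow_right (by norm_num) hi)
  have h2 : i ≠ v := by omega
  simp [h1, h2]

-- Python's "mask // 2 ** v % 2" is testBit
lemma pv_bittest (m : Int) (h : 0 ≤ m) (k : ℕ) :
    (PySem.Int.mod (PySem.Int.floordiv m ((2 : ℤ) ^ k)) 2 ≠ 0) ↔ Nat.testBit m.toNat k := by
  rw [PySem.Int.floordiv_eq_ediv_of_pos (by positivity), PySem.Int.mod_eq_emod_of_pos (by norm_num)]
  have hm : m = (m.toNat : ℤ) := by omega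
  have key : m / (2 : ℤ) ^ k % 2 = ((m.toNat / 2 ^ k % 2 : ℕ) : ℤ) := by
    conv_lhs => rw [hm]
    norm_cast
  rw [key, Nat.testBit_eq_decide_div_mod_eq]
  simp only [ne_eq, Nat.cast_eq_zero, decide_eq_true_eq]
  omega

-- Lemma A: calc_py on a digit agrees with the reference function
lemma pv_calcA (t : Int) : ∀ (n : ℕ) (p : List Int) (v : Fin 10),
    (Finset.univ \ pvDigs p).card ≤ n → p ≠ [] →
    calc_py ((v : ℕ) : ℤ) t p = pvR t v (pvDigs p) := by
  intro n
  induction n with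
  | zero =>
    intro p v hcard hne
    have hall : pvDigs p = Finset.univ := by
      have := Finset.card_eq_zero.mp (Nat.le_zero.mp hcard)
      have h2 := Finset.sdiff_eq_empty_iff_subset.mp this
      exact Finset.eq_univ_iff_forall.mpr (fun d => h2 (Finset.mem_univ d))
    have hvmem : ((v : ℕ) : ℤ) ∈ p := by
      rw [← pv_mem_digs, hall]; exact Finset.mem_univ v
    have hlen : p.length > 0 := List.length_pos_iff.mpr hne
    rw [calc_py]
    by_cases hvt : ((v : ℕ) : ℤ) = t
    · rw [if_pos ⟨hvt, hlen⟩, pvR_eq_one hvt]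
    · rw [if_neg (by tauto), dif_pos hvmem,
        pvR_eq_zero hvt (by rw [hall]; exact Finset.mem_univ v)]
  | succ n ih =>
    intro p v hcard hne
    have hlen : p.length > 0 := List.length_pos_iff.mpr hne
    rw [calc_py]
    by_cases hvt : ((v : ℕ) : ℤ) = t
    · rw [if_pos ⟨hvt, hlen⟩, pvR_eq_one hvt]
    · rw [if_neg (by tauto)]
      by_cases hvp : ((v : ℕ) : ℤ) ∈ p
      · rw [dif_pos hvp, pvR_eq_zero hvt (pv_mem_digs.mpr hvp)]
      · rw [dif_neg hvp]
        have hvd : v ∉ pvDigs p := fun hc => hvp (pv_mem_digs.mp hc)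
        have hcard' : (Finset.univ \ pvDigs (p ++ [((v : ℕ) : ℤ)])).card ≤ n := by
          rw [pvDigs_append_digit]
          have hvin : v ∈ Finset.univ \ pvDigs p := by simp [hvd]
          have : Finset.univ \ insert v (pvDigs p) = (Finset.univ \ pvDigs p).erase v := by
            ext d; simp [Finset.mem_sdiff, Finset.mem_erase]
          rw [this, Finset.card_erase_of_mem hvin]
          omega
        have hne' : p ++ [((v : ℕ) : ℤ)] ≠ [] := by simp
        rw [pvR_eq_rec hvt hvd, ← pvDigs_append_digit p v]
        rw [pv_modv1 v, pv_modv3 v, pv_modv7 v]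
        rw [ih _ (v + 1) hcard' hne', ih _ (v + 3) hcard' hne', ih _ (v + 7) hcard' hne']

-- the inner loop builds the row as a map over range(10)
lemma pvAltRow_eq_map (t : Int) (rows : List (List Int)) (mask : Int) :
    pvAltRow t rows mask = (PySem.List.pyRange 0 10 1).map (fun v =>
      if v = t then 1
      else if PySem.Int.mod (PySem.Int.floordiv mask (2 ^ v.toNat)) 2 ≠ 0 then 0
      else
        PySem.List.pyGetD (PySem.List.pyGetD rows ((2 : Int) ^ v.toNat - 1) [])
          (PySem.Int.mod (v + 1) 10) 0
      + PySem.List.pyGetD (PySem.List.pyGetD rows ((2 : Int) ^ v.toNat - 1) [])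
          (PySem.Int.mod (v + 3) 10) 0
      + PySem.List.pyGetD (PySem.List.pyGetD rows ((2 : Int) ^ v.toNat - 1) [])
          (PySem.Int.mod (v + 7) 10) 0) := by
  unfold pvAltRow
  rw [PySem.List.foldl_append_singleton_eq_map, List.nil_append]

-- loop invariant: rows holds the finished DP rows of the masks above M, newest first
def pvInv (t : Int) (rows : List (List Int)) (M : Int) : Prop :=
  rows.length = (1023 - M).toNat ∧
  ∀ j : ℕ, j < rows.length → ∀ v : Fin 10,
    PySem.List.pyGetD (PySem.List.pyGetD rows (j : ℤ) []) ((v : ℕ) : ℤ) 0 =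
      pvR t v (pvMaskSet (M + 1 + (j : ℤ)))

-- a fresh row matches the reference function, given the invariant
lemma pv_row_eq (t : Int) (rows : List (List Int)) (M : Int) (hM0 : 0 ≤ M) (hM1 : M ≤ 1023)
    (hinv : pvInv t rows M) (v : Fin 10) :
    PySem.List.pyGetD (pvAltRow t rows M) ((v : ℕ) : ℤ) 0 = pvR t v (pvMaskSet M) := by
  obtain ⟨hlen, hrows⟩ := hinv
  rw [pvAltRow_eq_map]
  rw [PySem.List.pyGetD_map_pyRange_of_nonneg _ 10 _ _ (by exact_mod_cast Nat.zero_le _)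
    (by exact_mod_cast v.isLt)]
  by_cases hvt : ((v : ℕ) : ℤ) = t
  · rw [if_pos hvt, pvR_eq_one hvt]
  · rw [if_neg hvt]
    have htn : (((v : ℕ) : ℤ)).toNat = (v : ℕ) := Int.toNat_natCast _
    by_cases hbit : Nat.testBit M.toNat (v : ℕ)
    · rw [if_pos (by rw [htn]; exact (pv_bittest M hM0 (v : ℕ)).mpr hbit)]
      rw [pvR_eq_zero hvt (by simp [pvMaskSet, hbit])]
    · rw [if_neg (by rw [htn]; intro hc; exact hbit ((pv_bittest M hM0 (v : ℕ)).mp hc))]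
      have hvnotin : v ∉ pvMaskSet M := by simp [pvMaskSet, hbit]
      have hmlt : M.toNat < 1024 := by omega
      obtain ⟨hlt1024, hbits⟩ := pv_maskInsert v.isLt hmlt (by simpa using hbit)
      have hone : (1 : ℕ) ≤ 2 ^ (v : ℕ) := Nat.one_le_two_pow
      have hidx : (2 : ℤ) ^ ((((v : ℕ) : ℤ)).toNat) - 1 = (((2 ^ (v : ℕ) - 1 : ℕ)) : ℤ) := by
        rw [htn, Nat.cast_sub hone]
        push_cast
        ring
      set j : ℕ := 2 ^ (v : ℕ) - 1 with hj
      have hjlt : j < rows.length := by rw [hlen]; omega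
      have hM2 : M + 1 + (j : ℤ) = M + 2 ^ ((((v : ℕ) : ℤ)).toNat) := by
        rw [htn, hj, Nat.cast_sub hone]
        push_cast
        ring
      have hM2' : (M + 2 ^ ((((v : ℕ) : ℤ)).toNat)).toNat = M.toNat + 2 ^ (v : ℕ) := by
        rw [htn]
        have h2 : ((2:ℤ) ^ (v : ℕ)) = (Nat.cast (2 ^ (v : ℕ)) : ℤ) := by push_cast; ring
        rw [h2, Int.toNat_add hM0 (by positivity), Int.toNat_natCast]
      have hmsk : pvMaskSet (M + 2 ^ ((((v : ℕ) : ℤ)).toNat)) = insert v (pvMaskSet M) := by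
        ext d
        simp only [pvMaskSet, Finset.mem_filter, Finset.mem_univ, true_and, Finset.mem_insert]
        rw [hM2', hbits (d : ℕ)]
        simp only [Bool.or_eq_true, decide_eq_true_eq]
        constructor
        · rintro (h | h)
          · exact Or.inr h
          · exact Or.inl (Fin.ext h)
        · rintro (h | h)
          · exact Or.inr (by rw [h])
          · exact Or.inl h
      rw [hidx]
      rw [pv_modv1 v, pv_modv3 v, pv_modv7 v]
      rw [hrows j hjlt (v + 1), hrows j hjlt (v + 3), hrows j hjlt (v + 7)]
      rw [hM2, hmsk]
      exact (pvR_eq_rec hvt hvnotin).symm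

-- the outer loop carries the invariant all the way down
lemma pv_outer (t : Int) : ∀ (n : ℕ) (M : Int) (rows : List (List Int)),
    M + 1 = n → -1 ≤ M → M ≤ 1023 → pvInv t rows M →
    pvInv t ((PySem.List.pyRange M (-1) (-1)).foldl
      (fun rows mask => pvAltRow t rows mask :: rows) rows) (-1) := by
  intro n
  induction n with
  | zero =>
    intro M rows hn h1 h2 hinv
    have hM : M = -1 := by omega
    subst hM
    rw [PySem.List.pyRange_neg_one_eq_nil (by norm_num)]
    exact hinv
  | succ n ih =>
    intro M rows hn h1 h2 hinv
    have hM0 : 0 ≤ M := by omega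
    rw [PySem.List.pyRange_neg_one_cons (by omega)]
    simp only [List.foldl_cons]
    apply ih (M - 1) _ (by omega) (by omega) (by omega)
    obtain ⟨hlen, hrows⟩ := hinv
    constructor
    · simp only [List.length_cons, hlen]; omega
    · intro j hj v
      cases j with
      | zero =>
        rw [PySem.List.pyGetD_natCast (pvAltRow t rows M :: rows) 0 []]
        rw [List.getD_cons_zero]
        have harg : M - 1 + 1 + ((0 : ℕ) : ℤ) = M := by push_cast; ring
        rw [harg]
        exact pv_row_eq t rows M hM0 h2 ⟨hlen, hrows⟩ v
      | succ j =>
        rw [PySem.List.pyGetD_natCast (pvAltRow t rows M :: rows) (j + 1) []]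
        rw [List.getD_cons_succ]
        rw [← PySem.List.pyGetD_natCast rows j []]
        have harg : M - 1 + 1 + ((j + 1 : ℕ) : ℤ) = M + 1 + (j : ℤ) := by push_cast; ring
        rw [harg]
        apply hrows j (by simp only [List.length_cons] at hj; omega) v

-- the finished rows list equals the reference function on every (mask, digit)
lemma pv_rows (t : Int) (v : Fin 10) (m : Int) (h0 : 0 ≤ m) (h1 : m ≤ 1023) :
    PySem.List.pyGetD (PySem.List.pyGetD (pvAltRows t) m []) ((v : ℕ) : ℤ) 0 =
      pvR t v (pvMaskSet m) := by
  have hbase : pvInv t [] 1023 := by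
    constructor
    · simp
    · intro j hj; simp at hj
  obtain ⟨hlen, hrows⟩ := pv_outer t 1024 1023 [] (by norm_num) (by norm_num) (by norm_num) hbase
  have hm : m = ((m.toNat : ℕ) : ℤ) := by omega
  have hjlt : m.toNat < (((PySem.List.pyRange 1023 (-1) (-1)).foldl
      (fun rows mask => pvAltRow t rows mask :: rows) [])).length := by
    rw [hlen]; omega
  have := hrows m.toNat hjlt v
  have harg : (-1 : ℤ) + 1 + ((m.toNat : ℕ) : ℤ) = m := by omega
  rw [harg] at this
  unfold pvAltRows
  rw [hm]
  exact this

-- the mask of a duplicate-free list of digits: bounds and decoded digit set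
lemma pv_sum_mask : ∀ (l : List Int), l.Nodup → (∀ x ∈ l, 0 ≤ x ∧ x ≤ 9) →
    0 ≤ (l.map (fun x => (2 : ℤ) ^ x.toNat)).sum ∧
    (l.map (fun x => (2 : ℤ) ^ x.toNat)).sum ≤ 1023 ∧
    pvMaskSet (l.map (fun x => (2 : ℤ) ^ x.toNat)).sum =
      Finset.univ.filter (fun d : Fin 10 => ((d : ℕ) : ℤ) ∈ l) := by
  intro l
  induction l with
  | nil =>
    intro _ _
    refine ⟨le_refl _, by norm_num, ?_⟩
    ext d; simp [pvMaskSet]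
  | cons x l ih =>
    intro hnd hbd
    obtain ⟨h0, h1, h2⟩ := ih (List.Nodup.of_cons hnd) (fun y hy => hbd y (List.mem_cons_of_mem x hy))
    have hx := hbd x (List.mem_cons_self)
    set s := (l.map (fun x => (2 : ℤ) ^ x.toNat)).sum with hs
    have hxl : x ∉ l := (List.nodup_cons.mp hnd).1
    have hbitx : Nat.testBit s.toNat x.toNat = false := by
      by_contra hc
      have : (⟨x.toNat, by omega⟩ : Fin 10) ∈ pvMaskSet s := by
        simp only [pvMaskSet, Finset.mem_filter, Finset.mem_univ, true_and]
        simpa using hc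
      rw [h2] at this
      simp only [Finset.mem_filter, Finset.mem_univ, true_and] at this
      have hxx : ((x.toNat : ℕ) : ℤ) = x := by omega
      rw [hxx] at this
      exact hxl this
    obtain ⟨hlt, hbits⟩ := pv_maskInsert (show x.toNat < 10 by omega) (show s.toNat < 1024 by omega) hbitx
    have h2' : ((2:ℤ) ^ x.toNat) = (Nat.cast (2 ^ x.toNat) : ℤ) := by push_cast; ring
    have hcast : ((2:ℤ) ^ x.toNat + s).toNat = s.toNat + 2 ^ x.toNat := by
      rw [h2', Int.toNat_add (by positivity) h0, Int.toNat_natCast, Nat.add_comm]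
    have hsum0 : (((x :: l).map (fun x => (2 : ℤ) ^ x.toNat)).sum) = 2 ^ x.toNat + s := by
      simp [hs]
    rw [hsum0]
    have hp : (0:ℤ) < 2 ^ x.toNat := by positivity
    refine ⟨by linarith, by rw [h2']; omega, ?_⟩
    ext d
    simp only [pvMaskSet, Finset.mem_filter, Finset.mem_univ, true_and, List.mem_cons]
    rw [hcast]
    rw [show s.toNat + 2 ^ x.toNat = s.toNat + 2 ^ x.toNat from rfl, hbits (d : ℕ)]
    simp only [Bool.or_eq_true, decide_eq_true_eq]
    have hmem : Nat.testBit s.toNat (d : ℕ) = true ↔ ((d : ℕ) : ℤ) ∈ l := by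
      constructor
      · intro hb
        have : d ∈ pvMaskSet s := by simp [pvMaskSet, hb]
        rw [h2] at this
        simpa using this
      · intro hml
        have : d ∈ pvMaskSet s := by rw [h2]; simpa using hml
        simpa [pvMaskSet] using this
    rw [hmem]
    constructor
    · rintro (h | h)
      · exact Or.inr h
      · left; omega
    · rintro (h | h)
      · right; omega
      · exact Or.inl h

-- main equality
lemma pv_main (f t : Int) (p : List Int) : calc_py f t p = calc_py_alt f t p := by
  rw [calc_py]
  unfold calc_py_alt
  by_cases h1 : f = t ∧ p.length > 0
  · rw [if_pos h1, if_pos h1]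
  · rw [if_neg h1, if_neg h1]
    by_cases h2 : f ∈ p
    · rw [dif_pos h2, if_pos h2]
    · rw [dif_neg h2, if_neg h2]
      simp only
      set vis : List Int := (if 0 ≤ f ∧ f ≤ 9 then (PySem.Set.ofList (List.filter (fun x => decide (0 ≤ x ∧ x ≤ 9)) p)).add f
              else PySem.Set.ofList (List.filter (fun x => decide (0 ≤ x ∧ x ≤ 9)) p)) with hvis
      set m0 : Int := List.foldl (fun s x => s + 2 ^ x.toNat) 0 vis with hm0
      have hnod : vis.Nodup := by
        rw [hvis]; split_ifs
        · exact PySem.Set.nodup_add _ _ (PySem.Set.nodup_ofList _)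
        · exact PySem.Set.nodup_ofList _
      have hmemv : ∀ x : ℤ, x ∈ vis ↔ (x ∈ p ++ [f] ∧ 0 ≤ x ∧ x ≤ 9) := by
        intro x
        rw [hvis]; split_ifs with hf
        · rw [PySem.Set.mem_add, PySem.Set.mem_ofList, List.mem_filter]
          simp only [List.mem_append, List.mem_singleton, decide_eq_true_eq]
          constructor
          · rintro (⟨hx, hb⟩ | rfl)
            · exact ⟨Or.inl hx, hb⟩
            · exact ⟨Or.inr rfl, hf⟩
          · rintro ⟨hx | rfl, hb⟩
            · exact Or.inl ⟨hx, hb⟩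
            · exact Or.inr rfl
        · rw [PySem.Set.mem_ofList, List.mem_filter]
          simp only [List.mem_append, List.mem_singleton, decide_eq_true_eq]
          constructor
          · rintro ⟨hx, hb⟩; exact ⟨Or.inl hx, hb⟩
          · rintro ⟨hx | rfl, hb⟩
            · exact ⟨hx, hb⟩
            · exact absurd hb hf
      have hbd : ∀ x ∈ vis, 0 ≤ x ∧ x ≤ 9 := fun x hx => ((hmemv x).mp hx).2
      obtain ⟨hs0, hs1, hs2⟩ := pv_sum_mask vis hnod hbd
      have hfold : m0 = (vis.map (fun x => (2:ℤ) ^ x.toNat)).sum := by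
        rw [hm0, PySem.List.foldl_add, zero_add]
      have hm0a : 0 ≤ m0 := hfold ▸ hs0
      have hm0b : m0 ≤ 1023 := hfold ▸ hs1
      have hmask : pvMaskSet m0 = pvDigs (p ++ [f]) := by
        rw [hfold, hs2]
        ext d
        simp only [Finset.mem_filter, Finset.mem_univ, true_and, pvDigs]
        rw [hmemv]
        have hd0 : (0:ℤ) ≤ ((d:ℕ):ℤ) := by exact_mod_cast Nat.zero_le _
        have hd9 : ((d:ℕ):ℤ) ≤ 9 := by exact_mod_cast Nat.lt_succ_iff.mp d.isLt
        tauto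
      have hne' : p ++ [f] ≠ [] := by simp
      have hcard : (Finset.univ \ pvDigs (p ++ [f])).card ≤ 10 := by
        calc (Finset.univ \ pvDigs (p ++ [f])).card
            ≤ (Finset.univ : Finset (Fin 10)).card := Finset.card_le_card Finset.sdiff_subset
          _ = 10 := by simp
      have key : ∀ k : Int, calc_py (PySem.Int.mod (f + k) 10) t (p ++ [f]) =
          PySem.List.pyGetD (PySem.List.pyGetD (pvAltRows t) m0 [])
            (PySem.Int.mod (f + k) 10) 0 := by
        intro k
        rw [← pvToDig_coe (f + k)]
        rw [pv_calcA t 10 _ (pvToDig (f + k)) hcard hne']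
        rw [pv_rows t (pvToDig (f + k)) m0 hm0a hm0b, hmask]
      rw [key 1, key 3, key 7]


-- ===== VERDICT (by name: the statement is the Claim_ definition above) =====
theorem calc_py_spec : Claim_equal_calc_py := by
  intro f t p _
  unfold Spec_calc_py
  exact pv_main f t p
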